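-- pv_equiv track=rewrite | github.com/mal1618/Artifact-Detection-in-EEG-Signals | mne_methods/ICA_subfunctions.py | broken_channel_classifier
-- ===== SOURCE A (Python) =====
-- def broken_channel_classifier(artifact_intervals, broken_interval_size = 3):
--     """
--     Returns all channels that are broken in a given number of consecutive intervals. Default broken_interval_size is 3
--     """
--     # counts the interval the broken channels occurs in
--     i = 0
--     res = dict()
--     for sub in artifact_intervals:
--         for chan in range(len(sub)):
--             if sub[chan] not in res:
--                 res[sub[chan]] = list()
--             intervals = res[sub[chan]]
--             intervals.append(i)
--             res[sub[chan]] = intervals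
--         i += 1
--
--     broken_channels = []
--
--     # counts consecutive occurences
--     for key in res.keys():
--         lst = res[key]
--         consec = [1]
--         for x, y in zip(lst, lst[1:]):
--             if x == y - 1:
--                 consec[-1] += 1
--             else:
--                 consec.append(1)
--         # checks consecutive occurences against broken_interval_size
--         if max(consec) >= broken_interval_size:
--             broken_channels.append(key)
--
--     return broken_channels
-- ===== SOURCE B (Python) =====
-- def broken_channel_classifier(artifact_intervals, broken_interval_size=3):
--     """
--     Returns all channels that are broken in a given number of consecutive intervals. Default broken_interval_size is 3
--     """
--     # one streaming pass: per channel keep (last interval index, current run, best run)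
--     state = {}
--     for i, sub in enumerate(artifact_intervals):
--         for chan in sub:
--             if chan not in state:
--                 state[chan] = (i, 1, 1)
--             else:
--                 last, run, best = state[chan]
--                 run = run + 1 if i == last + 1 else 1
--                 state[chan] = (i, run, max(best, run))
--     return [chan for chan, (_, _, best) in state.items() if best >= broken_interval_size]
-- ===== Notes on version B (the rewrite author's own statement) =====
-- stated objective: simpler
-- what changed: Replaces A's two-phase build-then-scan (collect per-channel interval-index lists, then re-scan each list for consecutive runs) with a single streaming pass that keeps only (last index, current run, best run) per channel and filters on best run.
import Mathlib
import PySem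

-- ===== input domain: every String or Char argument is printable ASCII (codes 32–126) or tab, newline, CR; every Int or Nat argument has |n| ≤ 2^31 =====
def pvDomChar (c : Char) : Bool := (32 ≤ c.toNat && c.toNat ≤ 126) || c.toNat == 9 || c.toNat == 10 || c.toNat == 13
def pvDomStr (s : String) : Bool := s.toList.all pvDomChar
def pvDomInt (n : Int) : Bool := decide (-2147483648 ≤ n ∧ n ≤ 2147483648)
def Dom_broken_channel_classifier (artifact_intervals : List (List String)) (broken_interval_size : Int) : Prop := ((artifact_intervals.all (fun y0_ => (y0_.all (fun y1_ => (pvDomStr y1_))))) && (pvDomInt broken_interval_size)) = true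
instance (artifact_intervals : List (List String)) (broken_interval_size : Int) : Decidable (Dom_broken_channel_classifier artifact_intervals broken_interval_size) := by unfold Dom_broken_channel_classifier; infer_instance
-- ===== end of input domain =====

-- B replaces A's build-then-scan (per-channel index lists, then a consecutive-run scan) by one
-- streaming pass keeping (last index, current run, best run) per channel; objective: simpler.

-- ===== PORT A =====
-- 'if sub[chan] not in res: res[...] = []' followed by append and re-assignment nets to one
-- insert of (previous list ++ [i]); 'for chan in range(len(sub)): sub[chan]' is in-range
-- indexing, iterated as the elements of sub (exact).
def dictStepA (i : Int) (d : PySem.Dict String (List Int)) (ch : String) : PySem.Dict String (List Int) :=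
  let intervals := d.getD ch []
  d.insert ch (intervals ++ [i])

-- the inner 'for x, y in zip(lst, lst[1:])' body: consec[-1] += 1 / consec.append(1)
def cstep (consec : List Int) (xy : Int × Int) : List Int :=
  if xy.1 == xy.2 - 1 then consec.dropLast ++ [(consec.getLast?.getD 0) + 1]
  else consec ++ [1]

def consecOf (lst : List Int) : List Int := (lst.zip lst.tail).foldl cstep [1]

def broken_channel_classifier (artifact_intervals : List (List String)) (broken_interval_size : Int) : List String :=
  let st := artifact_intervals.foldl
    (fun (st : PySem.Dict String (List Int) × Int) sub => (sub.foldl (dictStepA st.2) st.1, st.2 + 1))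
    (PySem.Dict.empty, 0)
  let res := st.1
  res.keys.foldl
    (fun broken_channels key =>
      let lst := res.getD key []
      let consec := consecOf lst
      -- max(consec): consec is nonempty (it starts as [1]), so max? returns a value
      if broken_interval_size ≤ (PySem.List.max? consec (fun z => z)).getD 0 then broken_channels ++ [key]
      else broken_channels) []

-- ===== PORT B =====
def bstep (t : Int × Int × Int) (i : Int) : Int × Int × Int :=
  let run := if i == t.1 + 1 then t.2.1 + 1 else 1
  (i, run, max t.2.2 run)

def dictStepB (i : Int) (d : PySem.Dict String (Int × Int × Int)) (ch : String) : PySem.Dict String (Int × Int × Int) :=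
  if d.contains ch then d.insert ch (bstep (d.getD ch (0, 0, 0)) i)
  else d.insert ch (i, 1, 1)

def broken_channel_classifier_alt (artifact_intervals : List (List String)) (broken_interval_size : Int) : List String :=
  let state := (PySem.List.enumerate artifact_intervals 0).foldl
    (fun d p => p.2.foldl (dictStepB p.1) d) PySem.Dict.empty
  (state.items.filter (fun kv => decide (broken_interval_size ≤ kv.2.2.2))).map (·.1)

-- ===== PRECONDITION & SPEC =====
def Spec_broken_channel_classifier (artifact_intervals : List (List String)) (broken_interval_size : Int) (out : List String) : Prop := out = broken_channel_classifier_alt artifact_intervals broken_interval_size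
instance (artifact_intervals : List (List String)) (broken_interval_size : Int) (out : List String) : Decidable (Spec_broken_channel_classifier artifact_intervals broken_interval_size out) := by unfold Spec_broken_channel_classifier; infer_instance

-- ===== CLAIM (what is proved, stated in full; the proofs are below) =====
def Claim_equal_broken_channel_classifier : Prop := ∀ (artifact_intervals : List (List String)) (broken_interval_size : Int), Dom_broken_channel_classifier artifact_intervals broken_interval_size → Spec_broken_channel_classifier artifact_intervals broken_interval_size (broken_channel_classifier artifact_intervals broken_interval_size)

-- ===== LEMMAS AND PROOFS =====

-- streaming state of B as a fold over a whole index list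
def gstep (st : Option (Int × Int × Int)) (i : Int) : Option (Int × Int × Int) :=
  match st with
  | none => some (i, 1, 1)
  | some t => some (bstep t i)

def gfold (l : List Int) : Option (Int × Int × Int) := l.foldl gstep none

lemma gfold_snoc (l : List Int) (i : Int) : gfold (l ++ [i]) = gstep (gfold l) i := by
  simp [gfold]

lemma pairs_snoc (l : List Int) (a y : Int) (h : l.getLast? = some a) :
    (l ++ [y]).zip (l ++ [y]).tail = l.zip l.tail ++ [(a, y)] := by
  induction l with
  | nil => simp at h
  | cons x xs ih =>
      cases xs with
      | nil => simp_all
      | cons b bs =>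
          simp only [List.getLast?_cons_cons] at h
          simpa using ih h

-- the heart: for a nonempty index list, B's streaming triple matches A's consec list
lemma runs_spec (l : List Int) (h : l ≠ []) :
    ∃ last run mx, gfold l = some (last, run, mx) ∧ l.getLast? = some last ∧
      (consecOf l).getLast? = some run ∧ run ≤ mx ∧ 1 ≤ run ∧
      mx ∈ consecOf l ∧ ∀ z ∈ consecOf l, z ≤ mx := by
  induction l using List.reverseRecOn with
  | nil => exact absurd rfl h
  | append_singleton l y ih =>
      cases hl : l with
      | nil =>
          subst hl
          refine ⟨y, 1, 1, ?_, ?_, ?_, le_refl _, le_refl _, ?_, ?_⟩ <;>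
            simp [gfold, gstep, consecOf]
      | cons a as =>
          have hlne : l ≠ [] := by simp [hl]
          rw [← hl] at *
          obtain ⟨last, run, mx, hgf, hlast, hcl, hrm, h1r, hmem, hub⟩ := ih hlne
          have hpairs := pairs_snoc l last y hlast
          have hconsec : consecOf (l ++ [y]) = cstep (consecOf l) (last, y) := by
            simp [consecOf, hpairs]
          have hc_decomp : consecOf l = (consecOf l).dropLast ++ [run] := by
            have := List.getLast?_eq_some_iff.mp hcl
            obtain ⟨ys, hys⟩ := this
            simp [hys]
          have hgf' : gfold (l ++ [y]) = some (bstep (last, run, mx) y) := by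
            rw [gfold_snoc, hgf]; rfl
          by_cases hyc : y = last + 1
          · -- run continues
            have hbeq : (last == y - 1) = true := by simp [hyc]
            have hbeq2 : (y == last + 1) = true := by simp [hyc]
            have hcs : cstep (consecOf l) (last, y) = (consecOf l).dropLast ++ [run + 1] := by
              simp [cstep, hbeq, hcl]
            have hbs : bstep (last, run, mx) y = (y, run + 1, max mx (run + 1)) := by
              simp [bstep, hbeq2]
            refine ⟨y, run + 1, max mx (run + 1), by rw [hgf', hbs], by simp,
              by rw [hconsec, hcs]; simp, le_max_right _ _, by omega, ?_, ?_⟩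
            · rw [hconsec, hcs]
              rcases le_or_gt mx (run + 1) with hle | hlt
              · rw [max_eq_right hle]; simp
              · rw [max_eq_left hlt.le]
                have hmx_ne : mx ≠ run := by omega
                have : mx ∈ (consecOf l).dropLast ++ [run] := hc_decomp ▸ hmem
                rcases List.mem_append.mp this with h' | h'
                · exact List.mem_append.mpr (Or.inl h')
                · simp at h'; omega
            · intro z hz
              rw [hconsec, hcs] at hz
              rcases List.mem_append.mp hz with h' | h'
              · have : z ∈ consecOf l := hc_decomp ▸ List.mem_append.mpr (Or.inl h')
                exact le_trans (hub z this) (le_max_left _ _)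
              · simp at h'; omega
          · -- run resets
            have hbeq : (last == y - 1) = false := by simp; omega
            have hbeq2 : (y == last + 1) = false := by simp; omega
            have hcs : cstep (consecOf l) (last, y) = consecOf l ++ [1] := by
              simp [cstep, hbeq]
            have hmx1 : max mx 1 = mx := max_eq_left (by omega)
            have hbs : bstep (last, run, mx) y = (y, 1, mx) := by
              simp [bstep, hbeq2, hmx1]
            refine ⟨y, 1, mx, by rw [hgf', hbs], by simp,
              by rw [hconsec, hcs]; simp, by omega, le_refl _, ?_, ?_⟩
            · rw [hconsec, hcs]; exact List.mem_append.mpr (Or.inl hmem)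
            · intro z hz
              rw [hconsec, hcs] at hz
              rcases List.mem_append.mp hz with h' | h'
              · exact hub z h'
              · simp at h'; omega

def RelD (dA : PySem.Dict String (List Int)) (dB : PySem.Dict String (Int × Int × Int)) : Prop :=
  dA.keys = dB.keys ∧ dA.keys.Nodup ∧
  (∀ ch l, dA.get? ch = some l → l ≠ []) ∧
  (∀ ch, dB.get? ch = (dA.get? ch).bind gfold)

lemma gfold_go_isSome (l : List Int) (t : Int × Int × Int) :
    ∃ u, l.foldl gstep (some t) = some u := by
  induction l generalizing t with
  | nil => exact ⟨t, rfl⟩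
  | cons a as ih => simpa [gstep] using ih (bstep t a)

lemma gfold_isSome (l : List Int) (h : l ≠ []) : ∃ t, gfold l = some t := by
  cases l with
  | nil => exact absurd rfl h
  | cons a as => simpa [gfold, gstep] using gfold_go_isSome as (a, 1, 1)

lemma rel_step (dA : PySem.Dict String (List Int)) (dB : PySem.Dict String (Int × Int × Int))
    (h : RelD dA dB) (i : Int) (ch : String) :
    RelD (dictStepA i dA ch) (dictStepB i dB ch) := by
  obtain ⟨hk, hnd, hne, hg⟩ := h
  have hcont : dA.contains ch = dB.contains ch := by
    rw [PySem.Dict.contains_eq_decide_mem_keys, PySem.Dict.contains_eq_decide_mem_keys, hk]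
  by_cases hc : dA.contains ch = true
  · -- key present in both
    have hcB : dB.contains ch = true := by rw [← hcont]; exact hc
    have hmem : ch ∈ dA.keys := (PySem.Dict.contains_iff_mem_keys _ _).mp hc
    obtain ⟨l, hl⟩ : ∃ l, dA.get? ch = some l := by
      cases hl' : dA.get? ch with
      | none => exact absurd ((PySem.Dict.get?_eq_none_iff_not_mem_keys _ _).mp hl') (by simpa using hmem)
      | some l => exact ⟨l, rfl⟩
    have hlne := hne ch l hl
    obtain ⟨t, ht⟩ : ∃ t, gfold l = some t := gfold_isSome l hlne
    have hBval : dB.get? ch = some t := by rw [hg ch, hl]; simpa using ht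
    have hgetA : dA.getD ch [] = l := PySem.Dict.getD_of_get?_eq_some _ _ hl
    have hgetB : dB.getD ch (0,0,0) = t := PySem.Dict.getD_of_get?_eq_some _ _ hBval
    refine ⟨?_, ?_, ?_, ?_⟩
    · simp [dictStepA, dictStepB, hcB, PySem.Dict.keys_insert_of_contains _ _ hc,
        PySem.Dict.keys_insert_of_contains _ _ hcB, hk]
    · simpa [dictStepA, PySem.Dict.keys_insert_of_contains _ _ hc] using hnd
    · intro ch' l' hl'
      by_cases he : ch' = ch
      · subst he
        simp [dictStepA, PySem.Dict.get?_insert_self] at hl'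
        simp [← hl']
      · simp [dictStepA, PySem.Dict.get?_insert_of_ne _ _ he] at hl'
        exact hne ch' l' hl'
    · intro ch'
      by_cases he : ch' = ch
      · subst he
        simp [dictStepA, dictStepB, hcB, PySem.Dict.get?_insert_self, hgetA, hgetB,
          gfold_snoc, ht, gstep]
      · simp [dictStepA, dictStepB, hcB, PySem.Dict.get?_insert_of_ne _ _ he, hg ch']
  · -- fresh key in both
    have hcB : dB.contains ch = false := by
      rw [← hcont]; exact Bool.not_eq_true _ ▸ (by simpa using hc)
    have hAnone : dA.get? ch = none := by
      rw [PySem.Dict.get?_eq_none_iff_not_mem_keys _ _]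
      intro hm
      exact hc ((PySem.Dict.contains_iff_mem_keys _ _).mpr hm)
    have hgetA : dA.getD ch [] = [] := PySem.Dict.getD_of_get?_eq_none _ _ hAnone
    refine ⟨?_, ?_, ?_, ?_⟩
    · simp [dictStepA, dictStepB, hcB,
        PySem.Dict.keys_insert_of_not_contains _ _ (by simpa using hc),
        PySem.Dict.keys_insert_of_not_contains _ _ hcB, hk]
    · have hnm : ch ∉ dA.keys := fun hm => hc ((PySem.Dict.contains_iff_mem_keys _ _).mpr hm)
      simp [dictStepA, PySem.Dict.keys_insert_of_not_contains _ _ (by simpa using hc),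
        List.nodup_append, hnd]
      exact fun a ha hea => hnm (hea ▸ ha)
    · intro ch' l' hl'
      by_cases he : ch' = ch
      · subst he
        simp [dictStepA, PySem.Dict.get?_insert_self] at hl'
        simp [← hl']
      · simp [dictStepA, PySem.Dict.get?_insert_of_ne _ _ he] at hl'
        exact hne ch' l' hl'
    · intro ch'
      by_cases he : ch' = ch
      · subst he
        simp [dictStepA, dictStepB, hcB, PySem.Dict.get?_insert_self, hgetA, gfold, gstep]
      · simp [dictStepA, dictStepB, hcB, PySem.Dict.get?_insert_of_ne _ _ he, hg ch']

lemma rel_inner (sub : List String) (i : Int) (dA : PySem.Dict String (List Int))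
    (dB : PySem.Dict String (Int × Int × Int)) (h : RelD dA dB) :
    RelD (sub.foldl (dictStepA i) dA) (sub.foldl (dictStepB i) dB) := by
  induction sub generalizing dA dB with
  | nil => exact h
  | cons x xs ih => exact ih _ _ (rel_step _ _ h i x)

lemma rel_outer (xs : List (List String)) (i : Int) (dA : PySem.Dict String (List Int))
    (dB : PySem.Dict String (Int × Int × Int)) (h : RelD dA dB) :
    RelD (xs.foldl (fun (st : PySem.Dict String (List Int) × Int) sub =>
          (sub.foldl (dictStepA st.2) st.1, st.2 + 1)) (dA, i)).1
        ((PySem.List.enumerate xs i).foldl (fun d p => p.2.foldl (dictStepB p.1) d) dB) := by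
  induction xs generalizing i dA dB with
  | nil => simpa [PySem.List.enumerate_nil] using h
  | cons sub rest ih =>
      rw [PySem.List.enumerate_cons]
      exact ih (i + 1) _ _ (rel_inner sub i dA dB h)

lemma rel_empty : RelD PySem.Dict.empty PySem.Dict.empty := by
  refine ⟨rfl, ?_, ?_, ?_⟩ <;> simp [PySem.Dict.keys, PySem.Dict.empty, PySem.Dict.get?]

-- per-key agreement of the two selection tests
lemma key_cond (dA : PySem.Dict String (List Int)) (dB : PySem.Dict String (Int × Int × Int))
    (h : RelD dA dB) (key : String) (hk : key ∈ dA.keys) (k : Int) :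
    decide (k ≤ (PySem.List.max? (consecOf (dA.getD key [])) (fun z => z)).getD 0)
      = decide (k ≤ (dB.getD key (0, 0, 0)).2.2) := by
  obtain ⟨_, _, hne, hg⟩ := h
  obtain ⟨l, hl⟩ : ∃ l, dA.get? key = some l := by
    cases hl' : dA.get? key with
    | none => exact absurd ((PySem.Dict.get?_eq_none_iff_not_mem_keys _ _).mp hl') (by simpa using hk)
    | some l => exact ⟨l, rfl⟩
  obtain ⟨last, run, mx, hgf, _, _, _, _, hmem, hub⟩ := runs_spec l (hne key l hl)
  have hgetA : dA.getD key [] = l := PySem.Dict.getD_of_get?_eq_some _ _ hl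
  have hgetB : dB.getD key (0, 0, 0) = (last, run, mx) := by
    apply PySem.Dict.getD_of_get?_eq_some
    rw [hg key, hl]; simpa using hgf
  obtain ⟨m, hm⟩ : ∃ m, PySem.List.max? (consecOf l) (fun z => z) = some m := by
    cases hm' : PySem.List.max? (consecOf l) (fun z => z) with
    | none =>
        rw [PySem.List.max?_eq_none_iff] at hm'
        rw [hm'] at hmem; exact absurd hmem (List.not_mem_nil)
    | some m => exact ⟨m, rfl⟩
  have hmmx : m = mx := by
    have h1 : m ≤ mx := hub m (PySem.List.max?_mem hm)
    have h2 : mx ≤ m := PySem.List.max?_isMax hm mx hmem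
    omega
  rw [hgetA, hgetB, hm, hmmx]
  simp

-- ===== VERDICT (by name: the statement is the Claim_ definition above) =====
theorem broken_channel_classifier_spec : Claim_equal_broken_channel_classifier := by
  intro artifact_intervals broken_interval_size _
  unfold Spec_broken_channel_classifier
  unfold broken_channel_classifier broken_channel_classifier_alt
  dsimp only
  have hrel := rel_outer artifact_intervals 0 PySem.Dict.empty PySem.Dict.empty rel_empty
  set dA := (artifact_intervals.foldl
    (fun (st : PySem.Dict String (List Int) × Int) sub =>
      (sub.foldl (dictStepA st.2) st.1, st.2 + 1)) (PySem.Dict.empty, 0)).1 with hdA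
  set dB := (PySem.List.enumerate artifact_intervals 0).foldl
    (fun d p => p.2.foldl (dictStepB p.1) d) PySem.Dict.empty with hdB
  obtain ⟨hkeys, hnd, hne, hg⟩ := hrel
  have hndB : dB.keys.Nodup := hkeys ▸ hnd
  -- A's output loop is a filter over the keys
  rw [PySem.List.foldl_append_ite_eq_filter
    (fun key => broken_interval_size ≤
      (PySem.List.max? (consecOf (dA.getD key [])) (fun z => z)).getD 0) dA.keys []]
  -- B's items are its keys paired with their values
  rw [PySem.Dict.items_eq_map_keys dB hndB (0, 0, 0), List.filter_map, List.map_map]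
  simp only [List.nil_append, Function.comp_def]
  rw [← hkeys, List.map_id'']
  · apply List.filter_congr
    intro key hkmem
    exact key_cond dA dB ⟨hkeys, hnd, hne, hg⟩ key hkmem broken_interval_size
  · intro a; rfl
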